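-- pv_equiv track=rewrite | github.com/rodolfopietro97/tractors-backend | cloud_storage_loader/helpers.py | get_brand_type
-- ===== SOURCE A (Python) =====
-- def get_brand_type(brand_files: list) -> str:
--     """
--     Get type of brand
--     :brand_files: Input brand_files grouped for brand name
--     :return: "Online", "PDF" or "Entrambi"
--     """
--
--     # 1 - Find if is a PDF brand. Attrezzature or Trattori folder NOT empty
--
--     is_pdf_brand = False
--
--     count_attrezzature = len([file for file in brand_files if "/Attrezzature" in file])
--
--     count_trattori = len([file for file in brand_files if "/Trattori" in file])
--
--     if count_attrezzature > 0 or count_trattori > 0: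
--         is_pdf_brand = True
--
--     # 2 - Find if online credentials are available for a brand
--
--     is_online_brand = (
--         len(
--             [
--                 brand_file
--                 for brand_file in brand_files
--                 if brand_file.endswith("online-credentials.json")
--             ]
--         )
--         > 0
--     )
--
--     return (
--         "Entrambi"
--         if is_pdf_brand and is_online_brand
--         else "PDF" if is_pdf_brand else "Online"
--     )
-- ===== SOURCE B (Python) =====
-- def get_brand_type(brand_files: list) -> str:
--     """Single pass: two flags maintained in one loop over brand_files."""
--     is_pdf = False
--     is_online = False
--     for f in brand_files:
--         if "/Attrezzature" in f or "/Trattori" in f: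
--             is_pdf = True
--         if f.endswith("online-credentials.json"):
--             is_online = True
--     return "Entrambi" if is_pdf and is_online else "PDF" if is_pdf else "Online"
-- ===== Notes on version B (the rewrite author's own statement) =====
-- stated objective: simpler
-- what changed: Replaces three separate list-comprehension scans (two counts plus an endswith filter) with one loop over brand_files maintaining two boolean flags.
import Mathlib
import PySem

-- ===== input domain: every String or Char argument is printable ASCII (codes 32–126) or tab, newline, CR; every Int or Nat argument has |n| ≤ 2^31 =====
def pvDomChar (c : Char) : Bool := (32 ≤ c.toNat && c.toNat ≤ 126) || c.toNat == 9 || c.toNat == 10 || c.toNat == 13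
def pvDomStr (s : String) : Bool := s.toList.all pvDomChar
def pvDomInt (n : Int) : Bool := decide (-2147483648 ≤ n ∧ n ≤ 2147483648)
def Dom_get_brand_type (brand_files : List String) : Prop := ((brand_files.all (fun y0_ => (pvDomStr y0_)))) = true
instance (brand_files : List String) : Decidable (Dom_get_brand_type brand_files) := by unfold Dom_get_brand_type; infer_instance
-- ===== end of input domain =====

-- B replaces A's three separate filter scans with one loop carrying two boolean flags (simpler decomposition; same result).


-- ===== PORT A =====
def get_brand_type (brand_files : List String) : String :=
  let is_pdf_brand := false
  let count_attrezzature :=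
    (brand_files.filter (fun file => PySem.Str.isIn "/Attrezzature" file)).length
  let count_trattori :=
    (brand_files.filter (fun file => PySem.Str.isIn "/Trattori" file)).length
  let is_pdf_brand :=
    if count_attrezzature > 0 ∨ count_trattori > 0 then true else is_pdf_brand
  let is_online_brand :=
    (brand_files.filter
      (fun brand_file => PySem.Str.endswith brand_file "online-credentials.json")).length > 0
  if is_pdf_brand && is_online_brand then "Entrambi"
  else if is_pdf_brand then "PDF" else "Online"

-- ===== PORT B =====
def get_brand_type_alt (brand_files : List String) : String :=
  let flags := brand_files.foldl
    (fun (st : Bool × Bool) f =>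
      let st1 := if PySem.Str.isIn "/Attrezzature" f || PySem.Str.isIn "/Trattori" f
                 then (true, st.2) else st
      if PySem.Str.endswith f "online-credentials.json" then (st1.1, true) else st1)
    (false, false)
  if flags.1 && flags.2 then "Entrambi"
  else if flags.1 then "PDF" else "Online"

-- ===== PRECONDITION & SPEC =====
def Spec_get_brand_type (brand_files : List String) (out : String) : Prop := out = get_brand_type_alt brand_files
instance (brand_files : List String) (out : String) : Decidable (Spec_get_brand_type brand_files out) := by unfold Spec_get_brand_type; infer_instance

-- ===== CLAIM (what is proved, stated in full; the proofs are below) =====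
def Claim_equal_get_brand_type : Prop := ∀ (brand_files : List String), Dom_get_brand_type brand_files → Spec_get_brand_type brand_files (get_brand_type brand_files)

-- ===== LEMMAS AND PROOFS =====

-- the loop of B computes "any pdf-marker" and "any online-marker", ∨-accumulated over the start flags
theorem alt_foldl_eq (brand_files : List String) (a b : Bool) :
    brand_files.foldl
      (fun (st : Bool × Bool) f =>
        let st1 := if PySem.Str.isIn "/Attrezzature" f || PySem.Str.isIn "/Trattori" f
                   then (true, st.2) else st
        if PySem.Str.endswith f "online-credentials.json" then (st1.1, true) else st1)
      (a, b)
    = (a || brand_files.any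
          (fun f => PySem.Str.isIn "/Attrezzature" f || PySem.Str.isIn "/Trattori" f),
       b || brand_files.any
          (fun f => PySem.Str.endswith f "online-credentials.json")) := by
  induction brand_files generalizing a b with
  | nil => simp
  | cons x xs ih =>
    simp only [List.foldl_cons, List.any_cons]
    cases h1 : PySem.Str.isIn "/Attrezzature" x || PySem.Str.isIn "/Trattori" x <;>
    cases h2 : PySem.Str.endswith x "online-credentials.json" <;>
      simp only [h1, h2, Bool.false_eq_true, if_false, if_true, ite_true, ite_false] <;>
      rw [ih] <;> simp only [Bool.or_assoc, Bool.false_or, Bool.true_or, Bool.or_true]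

-- any over a disjunction of predicates splits into two anys
theorem any_or_split {α : Type} (p q : α → Bool) (xs : List α) :
    xs.any (fun x => p x || q x) = (xs.any p || xs.any q) := by
  induction xs with
  | nil => rfl
  | cons x t ih => simp [List.any_cons, ih, Bool.or_assoc, Bool.or_left_comm]

-- a filter has positive length iff some element satisfies the predicate
theorem filter_len_pos {α : Type} (p : α → Bool) (xs : List α) :
    ((xs.filter p).length > 0) ↔ xs.any p = true := by
  simp [List.length_pos_iff, List.any_eq_true, List.filter_eq_nil_iff]

theorem get_brand_type_spec : Claim_equal_get_brand_type := by
  intro brand_files _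
  unfold Spec_get_brand_type get_brand_type get_brand_type_alt
  rw [alt_foldl_eq]
  simp only [Bool.false_or]
  by_cases hA : brand_files.any (fun f => PySem.Str.isIn "/Attrezzature" f) = true <;>
  by_cases hT : brand_files.any (fun f => PySem.Str.isIn "/Trattori" f) = true <;>
  by_cases hO : brand_files.any (fun f => PySem.Str.endswith f "online-credentials.json") = true <;>
    simp only [filter_len_pos, any_or_split, hA, hT, hO] <;> simp

-- ===== VERDICT (by name: the statement is the Claim_ definition above) =====
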